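-- pv_equiv track=rewrite | github.com/costapa4-ai/darwin | backend/introspection/code_generator.py | _template_add_error_handling
-- ===== SOURCE A (Python) =====
-- def _template_add_error_handling(current_code: str) -> str:
--     """Template for adding error handling"""
--     # Wrap main logic in try-except
--     lines = current_code.splitlines()
--     new_lines = []
--     in_function = False
--     indent = ''
--
--     for i, line in enumerate(lines):
--         if line.strip().startswith('def '):
--             in_function = True
--             indent = ' ' * (len(line) - len(line.lstrip()) + 4)
--             new_lines.append(line)
--             continue
--
--         if in_function and line.strip() and not line.strip().startswith('#'):
--             new_lines.append(f"{indent}try:")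
--             new_lines.append(f"{indent}    {line.strip()}")
--             # Add remaining lines
--             for j in range(i + 1, len(lines)):
--                 if lines[j].strip():
--                     new_lines.append(f"{indent}    {lines[j].strip()}")
--             new_lines.append(f"{indent}except Exception as e:")
--             new_lines.append(f"{indent}    logger.error(f'Error: {{e}}')")
--             new_lines.append(f"{indent}    raise")
--             break
--
--         new_lines.append(line)
--
--     return '\n'.join(new_lines)
-- ===== SOURCE B (Python) =====
-- def _template_add_error_handling(current_code: str) -> str:
--     """Template for adding error handling"""
--     lines = current_code.splitlines()
--
--     def is_def(l):
--         return l.strip().startswith('def ')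
--
--     first_def = next((i for i, l in enumerate(lines) if is_def(l)), None)
--     if first_def is None:
--         return '\n'.join(lines)
--
--     k = next((i for i in range(first_def + 1, len(lines))
--               if lines[i].strip()
--               and not lines[i].strip().startswith('#')
--               and not is_def(lines[i])), None)
--     if k is None:
--         return '\n'.join(lines)
--
--     def_line = next(l for l in reversed(lines[:k]) if is_def(l))
--     indent = ' ' * (len(def_line) - len(def_line.lstrip()) + 4)
--
--     body = [indent + '    ' + l.strip() for l in lines[k:] if l.strip()]
--     tail = [indent + 'except Exception as e:',
--             indent + "    logger.error(f'Error: {e}')",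
--             indent + '    raise']
--     return '\n'.join(lines[:k] + [indent + 'try:'] + body + tail)
-- ===== Notes on version B (the rewrite author's own statement) =====
-- stated objective: alternative
-- what changed: Replaced A's single stateful loop (in_function flag, continue, break, nested copy loop) with an index-finding decomposition: locate the first def line, then the wrap point, then assemble the output from slices, a filter/map over the tail and the last preceding def line's indent.
import Mathlib
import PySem

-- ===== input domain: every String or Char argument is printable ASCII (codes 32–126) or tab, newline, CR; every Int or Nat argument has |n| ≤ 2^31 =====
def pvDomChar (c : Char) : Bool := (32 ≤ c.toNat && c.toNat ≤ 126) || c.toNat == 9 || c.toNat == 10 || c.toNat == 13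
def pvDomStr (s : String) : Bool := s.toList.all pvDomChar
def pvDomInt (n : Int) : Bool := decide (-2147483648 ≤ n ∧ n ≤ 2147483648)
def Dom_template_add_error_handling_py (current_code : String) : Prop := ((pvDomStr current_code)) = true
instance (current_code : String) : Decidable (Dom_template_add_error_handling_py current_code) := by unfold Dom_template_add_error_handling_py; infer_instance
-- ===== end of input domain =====

-- B replaces A's stateful one-pass loop (flags, break, nested copy loop) by an index-finding
-- decomposition: locate the first def line and the wrap point, then assemble the result from
-- slices/filters; objective: alternative (same cost, plainer structure).

-- ===== PORT A =====
-- Python's `' ' * n`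
def pvSpaces (n : Int) : String := String.ofList (List.replicate n.toNat ' ')

-- the for-loop with `in_function`/`indent` state, `continue` and `break`, as structural recursion;
-- the inner `for j in range(i+1, len(lines))` is the foldl over the remaining lines
def pvAGo : List String → Bool → String → List String → List String
  | [], _, _, acc => acc.reverse
  | line :: rest, inFn, indent, acc =>
    if PySem.Str.startswith (PySem.Str.strip line) "def " = true then
      pvAGo rest true (pvSpaces (PySem.Str.len line - PySem.Str.len (PySem.Str.lstrip line) + 4)) (line :: acc)
    else if inFn = true ∧ PySem.Str.strip line ≠ "" ∧ ¬ PySem.Str.startswith (PySem.Str.strip line) "#" = true then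
      acc.reverse
        ++ [indent ++ "try:", indent ++ "    " ++ PySem.Str.strip line]
        ++ rest.foldl (fun a lj =>
             if PySem.Str.strip lj ≠ "" then a ++ [indent ++ "    " ++ PySem.Str.strip lj] else a) []
        ++ [indent ++ "except Exception as e:", indent ++ "    logger.error(f'Error: {e}')", indent ++ "    raise"]
    else
      pvAGo rest inFn indent (line :: acc)

def template_add_error_handling_py (current_code : String) : String :=
  PySem.Str.join "\n" (pvAGo (PySem.Str.splitlines current_code) false "" [])

-- ===== PORT B =====
def pvIsDef (l : String) : Bool := PySem.Str.startswith (PySem.Str.strip l) "def "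
def pvKeep (l : String) : Bool := !(PySem.Str.strip l == "")
def pvWrap (l : String) : Bool :=
  pvKeep l && !PySem.Str.startswith (PySem.Str.strip l) "#" && !pvIsDef l
def pvIndentOf (l : String) : String :=
  pvSpaces (PySem.Str.len l - PySem.Str.len (PySem.Str.lstrip l) + 4)
def pvTail (indent : String) : List String :=
  [indent ++ "except Exception as e:", indent ++ "    logger.error(f'Error: {e}')", indent ++ "    raise"]

-- B: find the first def line, then the wrap point after it, then assemble from slices.
-- Source B's `next(l for l in reversed(lines[:k]) if is_def(l))` always succeeds (the def at
-- `fd < k` is a candidate); `.getD ""` only discharges the Option and is never the value taken.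
def template_add_error_handling_py_alt (current_code : String) : String :=
  let lines := PySem.Str.splitlines current_code
  match lines.findIdx? pvIsDef with
  | none => PySem.Str.join "\n" lines
  | some fd =>
    match (lines.drop (fd + 1)).findIdx? pvWrap with
    | none => PySem.Str.join "\n" lines
    | some k' =>
      let k := fd + 1 + k'
      let indent := pvIndentOf ((((lines.take k).reverse).find? pvIsDef).getD "")
      PySem.Str.join "\n"
        (lines.take k ++ [indent ++ "try:"]
          ++ ((lines.drop k).filter pvKeep).map (fun l => indent ++ "    " ++ PySem.Str.strip l)
          ++ pvTail indent)

-- ===== PRECONDITION & SPEC =====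
def Spec_template_add_error_handling_py (current_code : String) (out : String) : Prop := out = template_add_error_handling_py_alt current_code
instance (current_code : String) (out : String) : Decidable (Spec_template_add_error_handling_py current_code out) := by unfold Spec_template_add_error_handling_py; infer_instance

-- ===== CLAIM (what is proved, stated in full; the proofs are below) =====
def Claim_equal_template_add_error_handling_py : Prop := ∀ (current_code : String), Dom_template_add_error_handling_py current_code → Spec_template_add_error_handling_py current_code (template_add_error_handling_py current_code)

-- ===== LEMMAS AND PROOFS =====

theorem pvKeep_iff (l : String) : pvKeep l = true ↔ PySem.Str.strip l ≠ "" := by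
  simp [pvKeep]

theorem pvWrap_iff (l : String) : pvWrap l = true ↔
    (PySem.Str.strip l ≠ "" ∧ PySem.Str.startswith (PySem.Str.strip l) "#" = false ∧ pvIsDef l = false) := by
  simp [pvWrap, pvKeep_iff, and_assoc]

-- the A-loop's skip condition, phrased on the Bool predicates
theorem pvSkip_of_not_wrap (l : String) (hdef : ¬ PySem.Str.startswith (PySem.Str.strip l) "def " = true)
    (hw : pvWrap l = false) (b : Bool) :
    ¬ (b = true ∧ PySem.Str.strip l ≠ "" ∧ ¬ PySem.Str.startswith (PySem.Str.strip l) "#" = true) := by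
  rintro ⟨-, hk, hc⟩
  have hd : pvIsDef l = false := by simpa [pvIsDef] using hdef
  have : pvWrap l = true := (pvWrap_iff l).2 ⟨hk, by simpa using hc, hd⟩
  rw [this] at hw; cases hw

-- A's inner copy loop is the filter/map over the remaining lines
theorem pvFoldl_filter (indent : String) (xs : List String) (a : List String) :
    xs.foldl (fun a lj =>
        if PySem.Str.strip lj ≠ "" then a ++ [indent ++ "    " ++ PySem.Str.strip lj] else a) a
      = a ++ (xs.filter pvKeep).map (fun l => indent ++ "    " ++ PySem.Str.strip l) := by
  induction xs generalizing a with
  | nil => simp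
  | cons x xs ih =>
    rw [List.foldl_cons]
    by_cases h : PySem.Str.strip x = ""
    · rw [if_neg (by simpa using h), ih, List.filter_cons_of_neg (by simp [pvKeep, h])]
    · rw [if_pos (by simpa using h), ih, List.filter_cons_of_pos ((pvKeep_iff x).2 h)]
      simp

-- true phase, no wrap point: every remaining line is appended verbatim
theorem pvTrue_none (lines : List String) (i : String) (acc : List String)
    (h : lines.findIdx? pvWrap = none) :
    pvAGo lines true i acc = acc.reverse ++ lines := by
  induction lines generalizing i acc with
  | nil => simp [pvAGo]
  | cons l rest ih =>
    rw [List.findIdx?_cons] at h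
    by_cases hw : pvWrap l = true
    · simp [hw] at h
    · rw [if_neg (by simp [hw])] at h
      have hw' : pvWrap l = false := by simpa using hw
      have hrest : rest.findIdx? pvWrap = none := by
        cases hfi : rest.findIdx? pvWrap <;> simp [hfi] at h ⊢
      by_cases hdef : PySem.Str.startswith (PySem.Str.strip l) "def " = true
      · rw [pvAGo, if_pos hdef, ih _ _ hrest]; simp
      · rw [pvAGo, if_neg hdef, if_neg (pvSkip_of_not_wrap l hdef hw' true), ih _ _ hrest]
        simp

-- true phase, wrap point at k: verbatim prefix, then the try block; the indent comes from the
-- last def line in the prefix, dl being the def line the phase was entered with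
theorem pvTrue_some (lines : List String) (k : Nat) (dl : String) (acc : List String)
    (h : lines.findIdx? pvWrap = some k) :
    pvAGo lines true (pvIndentOf dl) acc =
      acc.reverse ++ lines.take k
        ++ [pvIndentOf ((((lines.take k).reverse).find? pvIsDef).getD dl) ++ "try:"]
        ++ ((lines.drop k).filter pvKeep).map
            (fun l => pvIndentOf ((((lines.take k).reverse).find? pvIsDef).getD dl) ++ "    " ++ PySem.Str.strip l)
        ++ pvTail (pvIndentOf ((((lines.take k).reverse).find? pvIsDef).getD dl)) := by
  induction lines generalizing k dl acc with
  | nil => simp at h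
  | cons l rest ih =>
    rw [List.findIdx?_cons] at h
    by_cases hw : pvWrap l = true
    · rw [if_pos hw] at h
      obtain rfl : k = 0 := (Option.some.inj h).symm
      obtain ⟨hk, hc, hd⟩ := (pvWrap_iff l).1 hw
      have hdef : ¬ PySem.Str.startswith (PySem.Str.strip l) "def " = true := by
        simpa [pvIsDef] using hd
      have hkeep : pvKeep l = true := (pvKeep_iff l).2 hk
      rw [pvAGo, if_neg hdef, if_pos ⟨rfl, hk, by rw [Bool.not_eq_true]; exact hc⟩, pvFoldl_filter]
      simp [hkeep, pvTail]
    · rw [if_neg (by simp [hw])] at h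
      have hw' : pvWrap l = false := by simpa using hw
      obtain ⟨k', hk', rfl⟩ : ∃ k', rest.findIdx? pvWrap = some k' ∧ k = k' + 1 := by
        cases hfi : rest.findIdx? pvWrap <;> simp [hfi] at h
        · exact ⟨_, rfl, h.symm⟩
      rw [List.take_succ_cons, List.drop_succ_cons, List.reverse_cons, List.find?_append]
      by_cases hdef : PySem.Str.startswith (PySem.Str.strip l) "def " = true
      · have hfl : List.find? pvIsDef [l] = some l := by
          have : pvIsDef l = true := hdef
          simp [this]
        rw [hfl, pvAGo, if_pos hdef]
        have hstep : pvSpaces (PySem.Str.len l - PySem.Str.len (PySem.Str.lstrip l) + 4) = pvIndentOf l := rfl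
        rw [hstep, ih k' l (l :: acc) hk']
        cases hfo : (((rest.take k').reverse).find? pvIsDef) <;> simp
      · have hfl : List.find? pvIsDef [l] = none := by
          have : pvIsDef l = false := by simpa [pvIsDef] using hdef
          simp [this]
        rw [hfl, pvAGo, if_neg hdef, if_neg (pvSkip_of_not_wrap l hdef hw' true), ih k' dl (l :: acc) hk']
        cases hfo : (((rest.take k').reverse).find? pvIsDef) <;> simp

-- false phase, no def line at all: every line is appended verbatim
theorem pvFalse_none (lines : List String) (i : String) (acc : List String)
    (h : lines.findIdx? pvIsDef = none) :
    pvAGo lines false i acc = acc.reverse ++ lines := by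
  induction lines generalizing i acc with
  | nil => simp [pvAGo]
  | cons l rest ih =>
    rw [List.findIdx?_cons] at h
    by_cases hd : pvIsDef l = true
    · simp [hd] at h
    · rw [if_neg (by simp [hd])] at h
      have hrest : rest.findIdx? pvIsDef = none := by
        cases hfi : rest.findIdx? pvIsDef <;> simp [hfi] at h ⊢
      have hdef : ¬ PySem.Str.startswith (PySem.Str.strip l) "def " = true := hd
      rw [pvAGo, if_neg hdef, if_neg (by rintro ⟨h', -⟩; cases h'), ih _ _ hrest]
      simp

-- false phase up to and including the first def line
theorem pvFalse_some (lines : List String) (fd : Nat) (i : String) (acc : List String)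
    (h : lines.findIdx? pvIsDef = some fd) :
    pvAGo lines false i acc =
      pvAGo (lines.drop (fd + 1)) true (pvIndentOf (lines.getD fd ""))
        ((lines.take (fd + 1)).reverse ++ acc) := by
  induction lines generalizing fd i acc with
  | nil => simp at h
  | cons l rest ih =>
    rw [List.findIdx?_cons] at h
    by_cases hd : pvIsDef l = true
    · rw [if_pos hd] at h
      obtain rfl : fd = 0 := (Option.some.inj h).symm
      have hdef : PySem.Str.startswith (PySem.Str.strip l) "def " = true := hd
      rw [pvAGo, if_pos hdef]
      rfl
    · rw [if_neg (by simp [hd])] at h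
      obtain ⟨fd', hfd', rfl⟩ : ∃ fd', rest.findIdx? pvIsDef = some fd' ∧ fd = fd' + 1 := by
        cases hfi : rest.findIdx? pvIsDef <;> simp [hfi] at h
        · exact ⟨_, rfl, h.symm⟩
      have hdef : ¬ PySem.Str.startswith (PySem.Str.strip l) "def " = true := hd
      rw [pvAGo, if_neg hdef, if_neg (by rintro ⟨h', -⟩; cases h'), ih fd' i (l :: acc) hfd']
      simp

-- the first def line is what Source B's backwards search finds at the bottom of any prefix
theorem pvFind_take_first_def (lines : List String) (fd : Nat)
    (h : lines.findIdx? pvIsDef = some fd) :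
    ((lines.take (fd + 1)).reverse).find? pvIsDef = some (lines.getD fd "") := by
  induction lines generalizing fd with
  | nil => simp at h
  | cons l rest ih =>
    rw [List.findIdx?_cons] at h
    by_cases hd : pvIsDef l = true
    · rw [if_pos hd] at h
      obtain rfl : fd = 0 := (Option.some.inj h).symm
      simp [hd]
    · rw [if_neg (by simp [hd])] at h
      obtain ⟨fd', hfd', rfl⟩ : ∃ fd', rest.findIdx? pvIsDef = some fd' ∧ fd = fd' + 1 := by
        cases hfi : rest.findIdx? pvIsDef <;> simp [hfi] at h
        · exact ⟨_, rfl, h.symm⟩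
      rw [List.take_succ_cons, List.reverse_cons, List.find?_append, ih fd' hfd']
      simp

theorem pvOr_some_getD {α : Type} (o : Option α) (a b : α) : ((o.or (some a)).getD b) = o.getD a := by
  cases o <;> rfl

-- ===== VERDICT (by name: the statement is the Claim_ definition above) =====
set_option maxRecDepth 4000 in
theorem template_add_error_handling_py_spec : Claim_equal_template_add_error_handling_py := by
  intro s _
  unfold Spec_template_add_error_handling_py template_add_error_handling_py
    template_add_error_handling_py_alt
  cases h1 : (PySem.Str.splitlines s).findIdx? pvIsDef with
  | none => rw [pvFalse_none _ _ _ h1]; simp [h1]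
  | some fd =>
    rw [pvFalse_some _ _ _ _ h1]
    cases h2 : ((PySem.Str.splitlines s).drop (fd + 1)).findIdx? pvWrap with
    | none =>
      rw [pvTrue_none _ _ _ h2]
      simp [h1, h2]
    | some k' =>
      rw [pvTrue_some _ _ _ _ h2]
      simp only [h1, h2]
      have htake : (PySem.Str.splitlines s).take (fd + 1 + k')
          = (PySem.Str.splitlines s).take (fd + 1) ++ ((PySem.Str.splitlines s).drop (fd + 1)).take k' := by
        rw [List.take_add]
      have hdrop : ((PySem.Str.splitlines s).drop (fd + 1)).drop k'
          = (PySem.Str.splitlines s).drop (fd + 1 + k') := by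
        rw [List.drop_drop]
      conv_rhs => rw [htake, ← hdrop, List.reverse_append, List.find?_append,
        pvFind_take_first_def _ _ h1]
      rw [pvOr_some_getD]
      simp
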